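-- pv_equiv track=rewrite | github.com/eriosta/fibrox | model/read_dat.py | dedup_names
-- ===== SOURCE A (Python) =====
-- def dedup_names(names):
--     seen = {}
--     new_names = []
--     for name in names:
--         if name in seen:
--             seen[name] += 1
--             new_names.append(f"{name}.{seen[name]}")
--         else:
--             seen[name] = 0
--             new_names.append(name)
--     return new_names
-- ===== SOURCE B (Python) =====
-- def dedup_names(names):
--     # Index-then-scatter: group the positions of each name in one pass, then
--     # write each group's entries back into a preallocated result list — the
--     # earliest position keeps the bare name, the k-th later one gets "name.k".
--     positions = {}
--     for i, name in enumerate(names):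
--         positions.setdefault(name, []).append(i)
--     out = [""] * len(names)
--     for name, idxs in positions.items():
--         out[idxs[0]] = name
--         for k, i in enumerate(idxs[1:], 1):
--             out[i] = f"{name}.{k}"
--     return out
-- ===== Notes on version B (the rewrite author's own statement) =====
-- stated objective: alternative
-- what changed: Replaces A's single pass with a running per-name counter by a two-phase index-then-scatter: first group all positions by name into a dict of position lists, then scatter each group back into a preallocated result, bare name at its first position and name.k at its k-th later position.
import Mathlib
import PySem

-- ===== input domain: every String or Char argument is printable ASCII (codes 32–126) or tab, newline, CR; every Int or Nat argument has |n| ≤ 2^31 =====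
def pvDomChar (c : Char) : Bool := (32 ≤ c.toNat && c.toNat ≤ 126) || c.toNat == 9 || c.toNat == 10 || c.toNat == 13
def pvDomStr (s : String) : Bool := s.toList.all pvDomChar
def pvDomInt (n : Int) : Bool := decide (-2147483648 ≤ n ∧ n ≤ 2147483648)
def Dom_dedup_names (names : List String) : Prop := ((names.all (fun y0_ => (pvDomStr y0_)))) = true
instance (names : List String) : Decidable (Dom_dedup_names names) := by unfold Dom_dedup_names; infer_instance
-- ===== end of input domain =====

-- B replaces A's running-counter single pass by an index-then-scatter decomposition
-- (group positions per name, then write suffixed entries back by position); alternative, same value.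

-- ===== PORT A =====
def dedup_names (names : List String) : List String :=
  (names.foldl
    (fun (st : PySem.Dict String Int × List String) name =>
      match st.1.get? name with
      | some v => (st.1.insert name (v + 1), st.2 ++ [name ++ "." ++ PySem.Int.toStr (v + 1)])
      | none   => (st.1.insert name 0, st.2 ++ [name]))
    ((PySem.Dict.empty : PySem.Dict String Int), ([] : List String))).2

-- ===== PORT B =====
-- `positions.setdefault(name, []).append(i)` is `positions[name] = positions.get(name, []) + [i]`,
-- i.e. Dict.modify; enumerate indices are nonnegative list positions, represented as Nat
-- (List.zipIdx pairs are (element, index)); `out[i] = v` always has 0 ≤ i < len(out), so List.set is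
-- exact; the `[] => out` branch of the match is unreachable (dict values are built nonempty).
def dedup_names_alt (names : List String) : List String :=
  let positions : PySem.Dict String (List Nat) :=
    names.zipIdx.foldl (fun d p => d.modify p.1 [] (· ++ [p.2])) PySem.Dict.empty
  let out0 := List.replicate names.length ""
  positions.items.foldl
    (fun out pr =>
      match pr.2 with
      | [] => out
      | i0 :: rest =>
        (rest.zipIdx 1).foldl
          (fun o q => o.set q.1 (pr.1 ++ "." ++ PySem.Int.toStr (q.2 : Int)))
          (out.set i0 pr.1))
    out0

-- ===== PRECONDITION & SPEC =====
def Spec_dedup_names (names : List String) (out : List String) : Prop := out = dedup_names_alt names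
instance (names : List String) (out : List String) : Decidable (Spec_dedup_names names out) := by unfold Spec_dedup_names; infer_instance

-- ===== CLAIM (what is proved, stated in full; the proofs are below) =====
def Claim_equal_dedup_names : Prop := ∀ (names : List String), Dom_dedup_names names → Spec_dedup_names names (dedup_names names)

-- ===== LEMMAS AND PROOFS =====

-- common recursive specification: output for `rest`, given already-processed prefix `pre`
def dedupSpec : List String → List String → List String
  | _, [] => []
  | pre, n :: rest =>
    (if PySem.List.count pre n = 0 then n
     else n ++ "." ++ PySem.Int.toStr ((PySem.List.count pre n : Nat) : Int))
      :: dedupSpec (pre ++ [n]) rest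

-- the value the spec puts at a position whose name occurred c times before
def sufName (n : String) (c : Nat) : String :=
  if c = 0 then n else n ++ "." ++ PySem.Int.toStr (c : Int)

-- A's fold equals the spec, under the dictionary invariant
lemma dedupA_invariant (rest : List String) :
    ∀ (pre : List String) (seen : PySem.Dict String Int) (acc : List String),
      (∀ s, seen.get? s =
        if pre.count s = 0 then none else some ((pre.count s : Int) - 1)) →
      (rest.foldl
        (fun (st : PySem.Dict String Int × List String) name =>
          match st.1.get? name with
          | some v => (st.1.insert name (v + 1), st.2 ++ [name ++ "." ++ PySem.Int.toStr (v + 1)])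
          | none   => (st.1.insert name 0, st.2 ++ [name]))
        (seen, acc)).2 = acc ++ dedupSpec pre rest := by
  induction rest with
  | nil => intro pre seen acc _; simp [dedupSpec]
  | cons n r ih =>
    intro pre seen acc hinv
    by_cases hc : pre.count n = 0
    · have hget : seen.get? n = none := by rw [hinv n]; simp [hc]
      simp only [List.foldl_cons, hget]
      rw [ih (pre ++ [n]) _ _ ?_]
      · simp [dedupSpec, PySem.List.count_eq, hc]
      · intro s
        rw [PySem.Dict.get?_insert]
        by_cases hs : s = n
        · subst hs
          simp [List.count_append, hc]
        · simp only [if_neg hs, hinv s, List.count_append]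
          simp [Ne.symm hs]
    · have hget : seen.get? n = some ((pre.count n : Int) - 1) := by
        rw [hinv n]; simp [hc]
      simp only [List.foldl_cons, hget]
      rw [ih (pre ++ [n]) _ _ ?_]
      · have harith : ((pre.count n : Int) - 1) + 1 = ((pre.count n : Nat) : Int) := by ring
        simp [dedupSpec, PySem.List.count_eq, hc, harith]
      · intro s
        rw [PySem.Dict.get?_insert]
        by_cases hs : s = n
        · rw [hs, if_pos rfl]
          have hcnt : (pre ++ [n]).count n = pre.count n + 1 := by simp
          rw [hcnt]
          have hne : pre.count n + 1 ≠ 0 := by omega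
          rw [if_neg hne]
          congr 1
          push_cast
          ring
        · simp only [if_neg hs, hinv s, List.count_append]
          simp [Ne.symm hs]

lemma dedupA_eq_spec (names : List String) :
    dedup_names names = dedupSpec [] names := by
  unfold dedup_names
  rw [dedupA_invariant names [] _ [] (fun s => by simp [PySem.Dict.get?_empty])]
  simp

-- pointwise characterisation of the spec
lemma dedupSpec_getElem? (rest : List String) :
    ∀ (pre : List String) (j : Nat) (h : j < rest.length),
      (dedupSpec pre rest)[j]? =
        some (sufName rest[j] ((pre ++ rest.take j).count rest[j])) := by
  induction rest with
  | nil => intro pre j h; simp at h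
  | cons n r ih =>
    intro pre j h
    cases j with
    | zero => simp [dedupSpec, sufName, PySem.List.count_eq]
    | succ m =>
      have hm : m < r.length := by simpa using h
      have := ih (pre ++ [n]) m hm
      simpa [dedupSpec, List.append_assoc] using this

lemma dedupSpec_length (rest : List String) :
    ∀ pre, (dedupSpec pre rest).length = rest.length := by
  induction rest with
  | nil => intro pre; simp [dedupSpec]
  | cons n r ih => intro pre; simp [dedupSpec, ih]

-- B-side: positions of n in l (indices shifted by s), as built by the grouping pass
def grpFrom (l : List String) (s : Nat) (n : String) : List Nat :=
  ((l.zipIdx s).filter (fun p => p.1 == n)).map (fun p => p.2)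

lemma grpFrom_sound (l : List String) (n : String) :
    ∀ (s k i : Nat), (grpFrom l s n)[k]? = some i ->
      ∃ j, i = s + j ∧ j < l.length ∧ l[j]? = some n ∧ (l.take j).count n = k := by
  induction l with
  | nil => intro s k i hk; simp [grpFrom] at hk
  | cons m l' ih =>
    intro s k i hk
    by_cases hm : m = n
    · subst hm
      rw [grpFrom, List.zipIdx_cons] at hk
      simp only [List.filter_cons, BEq.rfl, if_pos, List.map_cons] at hk
      cases k with
      | zero =>
        simp only [List.getElem?_cons_zero, Option.some.injEq] at hk
        exact ⟨ 0, by omega, by simp, by simp, by simp ⟩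
      | succ k' =>
        rw [List.getElem?_cons_succ] at hk
        obtain ⟨ j', hj1, hj2, hj3, hj4 ⟩ := ih (s + 1) k' i hk
        refine ⟨ j' + 1, by omega, by simpa using hj2, by simpa using hj3, ?_ ⟩
        simp [List.take_succ_cons, hj4]
    · rw [grpFrom, List.zipIdx_cons] at hk
      have hne : ((m, s).1 == n) = false := by simpa using hm
      simp only [List.filter_cons, hne] at hk
      obtain ⟨ j', hj1, hj2, hj3, hj4 ⟩ := ih (s + 1) k i hk
      refine ⟨ j' + 1, by omega, by simpa using hj2, by simpa using hj3, ?_ ⟩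
      simp [List.take_succ_cons, hj4, hm]

lemma grpFrom_cover (l : List String) (n : String) :
    ∀ (s j : Nat), l[j]? = some n -> (s + j) ∈ grpFrom l s n := by
  induction l with
  | nil => intro s j hj; simp at hj
  | cons m l' ih =>
    intro s j hj
    cases j with
    | zero =>
      simp only [List.getElem?_cons_zero, Option.some.injEq] at hj
      subst hj
      simp [grpFrom, List.zipIdx_cons]
    | succ j' =>
      rw [List.getElem?_cons_succ] at hj
      have := ih (s + 1) j' hj
      have hmem : (s + 1 + j') ∈ grpFrom l' (s + 1) n := this
      by_cases hm : m = n
      · subst hm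
        rw [grpFrom, List.zipIdx_cons]
        simp only [List.filter_cons, BEq.rfl, if_pos, List.map_cons]
        right
        have : s + (j' + 1) = s + 1 + j' := by omega
        rw [this]
        exact hmem
      · rw [grpFrom, List.zipIdx_cons]
        have hne : ((m, s).1 == n) = false := by simpa using hm
        simp only [List.filter_cons, hne]
        have : s + (j' + 1) = s + 1 + j' := by omega
        rw [this]
        exact hmem

-- the writes a single dict item performs in B's scatter phase
def writesOf (p : String × List Nat) : List (Nat × String) :=
  match p.2 with
  | [] => []
  | i0 :: rest =>
    (i0, p.1) :: (rest.zipIdx 1).map (fun q => (q.1, p.1 ++ "." ++ PySem.Int.toStr (q.2 : Int)))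

lemma scatter_body_eq (out : List String) (p : String × List Nat) :
    (match p.2 with
     | [] => out
     | i0 :: rest =>
       (rest.zipIdx 1).foldl
         (fun o q => o.set q.1 (p.1 ++ "." ++ PySem.Int.toStr (q.2 : Int)))
         (out.set i0 p.1))
    = (writesOf p).foldl (fun o q => o.set q.1 q.2) out := by
  cases h : p.2 with
  | nil => simp [writesOf, h]
  | cons i0 rest => simp [writesOf, h, List.foldl_map]

-- a fold of writes that all agree with `target` lands on `target` at every covered index
lemma scatter_writes (target : List String) :
    ∀ (W : List (Nat × String)) (out : List String),
      out.length = target.length ->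
      (∀ p ∈ W, target[p.1]? = some p.2) ->
      ∀ j, ((∃ p ∈ W, p.1 = j) ∨ out[j]? = target[j]?) ->
        (W.foldl (fun o q => o.set q.1 q.2) out)[j]? = target[j]? := by
  intro W
  induction W with
  | nil =>
    intro out _ _ j hj
    rcases hj with ⟨ p, hp, _ ⟩ | h
    · exact absurd hp (List.not_mem_nil)
    · simpa using h
  | cons w W' ih =>
    intro out hlen hW j hj
    have hw : target[w.1]? = some w.2 := hW w (List.mem_cons_self)
    have hwlt : w.1 < out.length := by
      rw [hlen]
      exact (List.getElem?_eq_some_iff.mp hw).1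
    have hlen' : (out.set w.1 w.2).length = target.length := by simpa using hlen
    have hW' : ∀ p ∈ W', target[p.1]? = some p.2 := fun p hp => hW p (List.mem_cons_of_mem _ hp)
    simp only [List.foldl_cons]
    apply ih _ hlen' hW' j
    rcases hj with ⟨ p, hp, hpj ⟩ | hold
    · rcases List.mem_cons.mp hp with rfl | hp'
      · right
        subst hpj
        rw [List.getElem?_set_self hwlt, hw]
      · exact Or.inl ⟨ p, hp', hpj ⟩
    · by_cases hjw : j = w.1
      · right
        subst hjw
        rw [List.getElem?_set_self hwlt, hw]
      · right
        rw [List.getElem?_set_ne (Ne.symm hjw), hold]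

lemma dedupB_eq_spec (names : List String) :
    dedup_names_alt names = dedupSpec [] names := by
  have hgetD : ∀ n, ((names.zipIdx.foldl
      (fun (d : PySem.Dict String (List Nat)) p => d.modify p.1 [] (fun x => x ++ [p.2]))
      PySem.Dict.empty)).getD n [] = grpFrom names 0 n := by
    intro n
    simpa [grpFrom] using
      PySem.Dict.getD_foldl_modify_append (l := names.zipIdx) (d := PySem.Dict.empty) (c := n)
  have hnodup : ((names.zipIdx.foldl
      (fun (d : PySem.Dict String (List Nat)) p => d.modify p.1 [] (fun x => x ++ [p.2]))
      PySem.Dict.empty)).keys.Nodup :=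
    PySem.Dict.nodup_keys_foldl_modify_key _ _ _ _ _ PySem.Dict.nodup_keys_empty
  have hmemkeys : ∀ n, n ∈ names -> n ∈ ((names.zipIdx.foldl
      (fun (d : PySem.Dict String (List Nat)) p => d.modify p.1 [] (fun x => x ++ [p.2]))
      PySem.Dict.empty)).keys := by
    intro n hn
    rw [PySem.Dict.keys_foldl_modify_key]
    rw [PySem.Set.mem_update]
    right
    simpa [List.zipIdx_map_fst] using hn
  have hitems : ((names.zipIdx.foldl
      (fun (d : PySem.Dict String (List Nat)) p => d.modify p.1 [] (fun x => x ++ [p.2]))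
      PySem.Dict.empty)).items
      = ((names.zipIdx.foldl
      (fun (d : PySem.Dict String (List Nat)) p => d.modify p.1 [] (fun x => x ++ [p.2]))
      PySem.Dict.empty)).keys.map (fun k => (k, grpFrom names 0 k)) := by
    rw [PySem.Dict.items_eq_map_keys _ hnodup []]
    exact List.map_congr_left (fun k _ => by rw [hgetD])
  have htlen : (dedupSpec [] names).length = names.length := dedupSpec_length names []
  -- rewrite B as a flat fold of writes
  have hflat : dedup_names_alt names
      = ((((names.zipIdx.foldl
            (fun (d : PySem.Dict String (List Nat)) p => d.modify p.1 [] (fun x => x ++ [p.2]))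
            PySem.Dict.empty)).items.flatMap writesOf).foldl
          (fun o q => o.set q.1 q.2) (List.replicate names.length "")) := by
    rw [dedup_names_alt]
    rw [List.foldl_ext _ _ _ (fun out p _ => scatter_body_eq out p)]
    exact (List.foldl_flatMap ..).symm
  rw [hflat]
  apply List.ext_getElem?
  intro j
  apply scatter_writes
  · simp [htlen]
  · -- every write agrees with the spec
    intro p hp
    obtain ⟨ item, hitem, hpw ⟩ := List.mem_flatMap.mp hp
    rw [hitems] at hitem
    obtain ⟨ n, hnk, rfl ⟩ := List.mem_map.mp hitem
    rcases hg : grpFrom names 0 n with _ | ⟨ i0, rest ⟩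
    · rw [writesOf, hg] at hpw; simp at hpw
    · rw [writesOf, hg] at hpw
      rcases List.mem_cons.mp hpw with rfl | hmap
      · dsimp only
        have h0 : (grpFrom names 0 n)[0]? = some i0 := by rw [hg]; rfl
        obtain ⟨ j0, hj0, hlt, hget, hcnt ⟩ := grpFrom_sound names n 0 0 i0 h0
        have hij : i0 = j0 := by omega
        subst hij
        have hnm : names[i0] = n := by
          have := hget; rw [List.getElem?_eq_getElem hlt] at this; exact Option.some.inj this
        rw [dedupSpec_getElem? names [] i0 hlt]
        simp [sufName, hcnt, hnm]
      · obtain ⟨ q, hq, rfl ⟩ := List.mem_map.mp hmap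
        obtain ⟨ qi, qk ⟩ := q
        dsimp only
        obtain ⟨ h1, h2, h3 ⟩ := List.mem_zipIdx hq
        obtain ⟨ m, rfl ⟩ : ∃ m, qk = m + 1 := ⟨ qk - 1, by omega ⟩
        have hrest : (grpFrom names 0 n)[m + 1]? = some qi := by
          rw [hg, List.getElem?_cons_succ,
            List.getElem?_eq_getElem (by omega : m < rest.length)]
          simp [h3]
        obtain ⟨ j0, hj0, hlt, hget, hcnt ⟩ := grpFrom_sound names n 0 (m + 1) qi hrest
        have hij : qi = j0 := by omega
        have hnm : names[j0] = n := by
          have := hget; rw [List.getElem?_eq_getElem hlt] at this; exact Option.some.inj this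
        rw [hij, dedupSpec_getElem? names [] j0 hlt]
        simp [sufName, hcnt, hnm]
  · -- coverage / out-of-range
    by_cases hjL : j < names.length
    · left
      have hget : names[j]? = some names[j] := List.getElem?_eq_getElem hjL
      have hmem : (0 + j) ∈ grpFrom names 0 names[j] := grpFrom_cover names names[j] 0 j hget
      rw [Nat.zero_add] at hmem
      have hnk := hmemkeys names[j] (List.getElem_mem hjL)
      have hitemmem : (names[j], grpFrom names 0 names[j]) ∈ ((names.zipIdx.foldl
          (fun (d : PySem.Dict String (List Nat)) p => d.modify p.1 [] (fun x => x ++ [p.2]))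
          PySem.Dict.empty)).items := by
        rw [hitems]
        exact List.mem_map.mpr ⟨ names[j], hnk, rfl ⟩
      rcases hg : grpFrom names 0 names[j] with _ | ⟨ i0, rest ⟩
      · rw [hg] at hmem; simp at hmem
      · rw [hg] at hmem
        rcases List.mem_cons.mp hmem with rfl | hrest
        · refine ⟨ (j, names[j]), ?_, rfl ⟩
          apply List.mem_flatMap.mpr
          refine ⟨ (names[j], grpFrom names 0 names[j]), hitemmem, ?_ ⟩
          rw [writesOf, hg]
          exact List.mem_cons_self
        · obtain ⟨ m, hm, hm2 ⟩ := List.mem_iff_getElem.mp hrest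
          refine ⟨ (j, names[j] ++ "." ++ PySem.Int.toStr ((1 + m : Nat) : Int)), ?_, rfl ⟩
          apply List.mem_flatMap.mpr
          refine ⟨ (names[j], grpFrom names 0 names[j]), hitemmem, ?_ ⟩
          rw [writesOf, hg]
          apply List.mem_cons_of_mem
          apply List.mem_map.mpr
          refine ⟨ (j, 1 + m), ?_, rfl ⟩
          have hz : (rest.zipIdx 1)[m]'(by simpa using hm) = (rest[m], 1 + m) :=
            List.getElem_zipIdx ..
          rw [hm2] at hz
          rw [← hz]
          exact List.getElem_mem _
    · right
      rw [List.getElem?_eq_none (by simpa using Nat.le_of_not_lt hjL),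
          List.getElem?_eq_none (by rw [htlen]; exact Nat.le_of_not_lt hjL)]

-- ===== VERDICT (by name: the statement is the Claim_ definition above) =====
theorem dedup_names_spec : Claim_equal_dedup_names := by
  intro names _
  unfold Spec_dedup_names
  rw [dedupA_eq_spec, dedupB_eq_spec]
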